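-- pv_equiv track=rewrite | github.com/mmaitland300/Research-Radar | services/pipeline/pipeline/ml_tiny_baseline.py | stratified_round_robin_fold_test_indices
-- ===== SOURCE A (Python) =====
-- from typing import Any, Sequence
--
-- class MLTinyBaselineError(Exception):
--     def __init__(self, message: str, *, code: int = 2) -> None:
--         super().__init__(message)
--         self.code = code
--
-- def stratified_round_robin_fold_test_indices(
--     row_ids: Sequence[str],
--     y: Sequence[int],
--     n_folds: int,
-- ) -> list[list[int]]:
--     """Round-robin assignment within each class; indices sorted by row_id for determinism."""
--     if n_folds < 2:
--         raise MLTinyBaselineError(f"n_folds must be >= 2, got {n_folds}")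
--     pos = [i for i, yi in enumerate(y) if yi == 1]
--     neg = [i for i, yi in enumerate(y) if yi == 0]
--     pos.sort(key=lambda i: row_ids[i])
--     neg.sort(key=lambda i: row_ids[i])
--     fold_tests: list[list[int]] = [[] for _ in range(n_folds)]
--     for j, i in enumerate(pos):
--         fold_tests[j % n_folds].append(i)
--     for j, i in enumerate(neg):
--         fold_tests[j % n_folds].append(i)
--     return fold_tests
-- ===== SOURCE B (Python) =====
-- from typing import Any, Sequence
--
-- class MLTinyBaselineError(Exception):
--     def __init__(self, message: str, *, code: int = 2) -> None:
--         super().__init__(message)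
--         self.code = code
--
-- def stratified_round_robin_fold_test_indices(
--     row_ids: Sequence[str],
--     y: Sequence[int],
--     n_folds: int,
-- ) -> list[list[int]]:
--     """Fold-major: each fold is a strided slice of the per-class sorted index lists."""
--     if n_folds < 2:
--         raise MLTinyBaselineError(f"n_folds must be >= 2, got {n_folds}")
--     pos = sorted((i for i, yi in enumerate(y) if yi == 1), key=lambda i: row_ids[i])
--     neg = sorted((i for i, yi in enumerate(y) if yi == 0), key=lambda i: row_ids[i])
--     return [pos[f::n_folds] + neg[f::n_folds] for f in range(n_folds)]
-- ===== Notes on version B (the rewrite author's own statement) =====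
-- stated objective: alternative
-- what changed: B keeps A's per-class partition and sort by row_id but replaces A's element-by-element loops that append index j to fold j % n_folds with a fold-major construction: each fold f is built directly as the strided slices pos[f::n_folds] + neg[f::n_folds].
import Mathlib
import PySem

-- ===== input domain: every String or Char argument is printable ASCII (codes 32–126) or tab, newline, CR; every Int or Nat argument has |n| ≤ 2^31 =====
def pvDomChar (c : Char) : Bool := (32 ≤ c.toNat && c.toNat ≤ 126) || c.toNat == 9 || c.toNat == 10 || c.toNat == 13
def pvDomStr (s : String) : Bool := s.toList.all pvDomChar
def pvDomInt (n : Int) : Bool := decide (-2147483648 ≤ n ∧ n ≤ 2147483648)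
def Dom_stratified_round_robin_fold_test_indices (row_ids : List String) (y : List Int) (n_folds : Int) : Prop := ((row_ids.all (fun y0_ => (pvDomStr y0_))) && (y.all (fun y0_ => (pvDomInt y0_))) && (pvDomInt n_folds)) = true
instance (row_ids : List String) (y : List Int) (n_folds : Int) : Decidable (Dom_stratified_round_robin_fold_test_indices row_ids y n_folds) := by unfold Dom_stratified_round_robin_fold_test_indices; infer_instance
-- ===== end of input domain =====

-- B replaces A's element-by-element round-robin append loops by a fold-major build:
-- each fold is the strided slice pos[f::n_folds] + neg[f::n_folds] (objective: alternative, same cost).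

-- ===== PORT A =====
def stratified_round_robin_fold_test_indices (row_ids : List String) (y : List Int) (n_folds : Int) : List (List Int) :=
  if n_folds < 2 then []  -- Python raises MLTinyBaselineError here; excluded by Pre_
  else
    let pos0 := ((PySem.List.enumerate y).filter (fun p => p.2 == 1)).map (fun p => p.1)
    let neg0 := ((PySem.List.enumerate y).filter (fun p => p.2 == 0)).map (fun p => p.1)
    -- row_ids[i] raises IndexError when i is out of range; excluded by Pre_
    let pos := PySem.List.sorted pos0 (fun i => PySem.List.pyGetD row_ids i "") false
    let neg := PySem.List.sorted neg0 (fun i => PySem.List.pyGetD row_ids i "") false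
    let init : List (List Int) := (PySem.List.pyRange 0 n_folds 1).map (fun _ => ([] : List Int))
    let ft1 := (PySem.List.enumerate pos).foldl (fun ft p =>
      PySem.List.pySetD ft (PySem.Int.mod p.1 n_folds)
        (PySem.List.pyGetD ft (PySem.Int.mod p.1 n_folds) [] ++ [p.2])) init
    (PySem.List.enumerate neg).foldl (fun ft p =>
      PySem.List.pySetD ft (PySem.Int.mod p.1 n_folds)
        (PySem.List.pyGetD ft (PySem.Int.mod p.1 n_folds) [] ++ [p.2])) ft1

-- ===== PORT B =====
def stratified_round_robin_fold_test_indices_alt (row_ids : List String) (y : List Int) (n_folds : Int) : List (List Int) :=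
  if n_folds < 2 then []  -- B raises MLTinyBaselineError here too; excluded by Pre_
  else
    let pos := PySem.List.sorted (((PySem.List.enumerate y).filter (fun p => p.2 == 1)).map (fun p => p.1))
      (fun i => PySem.List.pyGetD row_ids i "") false
    let neg := PySem.List.sorted (((PySem.List.enumerate y).filter (fun p => p.2 == 0)).map (fun p => p.1))
      (fun i => PySem.List.pyGetD row_ids i "") false
    (PySem.List.pyRange 0 n_folds 1).map (fun f =>
      (PySem.List.slice? pos (some f) none n_folds).getD [] ++
      (PySem.List.slice? neg (some f) none n_folds).getD [])

-- ===== PRECONDITION & SPEC =====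
-- Pre_ excludes exactly the inputs where the Python A raises: n_folds < 2 (MLTinyBaselineError),
-- and indices of class-0/1 labels that are out of range for row_ids (IndexError in the sort key).
def Pre_stratified_round_robin_fold_test_indices (row_ids : List String) (y : List Int) (n_folds : Int) : Prop :=
  2 ≤ n_folds ∧ ∀ k < y.length, (y.getD k 0 = 0 ∨ y.getD k 0 = 1) → k < row_ids.length
instance (row_ids : List String) (y : List Int) (n_folds : Int) : Decidable (Pre_stratified_round_robin_fold_test_indices row_ids y n_folds) := by unfold Pre_stratified_round_robin_fold_test_indices; infer_instance

def pvWitness_stratified_round_robin_fold_test_indices : List String × List Int × Int := (["b", "a", "c"], [1, 0, 1], 2)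

def Spec_stratified_round_robin_fold_test_indices (row_ids : List String) (y : List Int) (n_folds : Int) (out : List (List Int)) : Prop := out = stratified_round_robin_fold_test_indices_alt row_ids y n_folds
instance (row_ids : List String) (y : List Int) (n_folds : Int) (out : List (List Int)) : Decidable (Spec_stratified_round_robin_fold_test_indices row_ids y n_folds out) := by unfold Spec_stratified_round_robin_fold_test_indices; infer_instance

-- ===== CLAIM (what is proved, stated in full; the proofs are below) =====
def Claim_equal_stratified_round_robin_fold_test_indices : Prop := ∀ (row_ids : List String) (y : List Int) (n_folds : Int), Dom_stratified_round_robin_fold_test_indices row_ids y n_folds → Pre_stratified_round_robin_fold_test_indices row_ids y n_folds → Spec_stratified_round_robin_fold_test_indices row_ids y n_folds (stratified_round_robin_fold_test_indices row_ids y n_folds)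

-- ===== LEMMAS AND PROOFS =====

-- elements of xs at (absolute) positions p ≡ f (mod n), positions counted from s
def pvStrided {α : Type} (xs : List α) (s n f : Int) : List α :=
  match xs with
  | [] => []
  | x :: t => if PySem.Int.mod s n = f then x :: pvStrided t (s + 1) n f else pvStrided t (s + 1) n f

-- every n-th element, starting with the head
def pvEveryN {α : Type} (xs : List α) (n : Nat) : List α :=
  match xs with
  | [] => []
  | x :: t => x :: pvEveryN (t.drop (n - 1)) n
termination_by xs.length
decreasing_by simp

lemma pvFoldA {n : Int} (hn : 0 < n) :
    ∀ (xs : List Int) (s : Int) (ft : List (List Int)), 0 ≤ s → ft.length = n.toNat →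
    (PySem.List.enumerate xs s).foldl (fun ft p =>
        PySem.List.pySetD ft (PySem.Int.mod p.1 n)
          (PySem.List.pyGetD ft (PySem.Int.mod p.1 n) [] ++ [p.2])) ft
      = (List.range n.toNat).map (fun k => ft.getD k [] ++ pvStrided xs s n (k : Int)) := by
  intro xs
  induction xs with
  | nil =>
    intro s ft _ hlen
    rw [PySem.List.enumerate_nil]
    simp only [List.foldl_nil]
    apply List.ext_getElem
    · simp [hlen]
    · intro i h1 h2
      simp only [List.getElem_map, List.getElem_range]
      rw [List.getD_eq_getElem ft [] (n := i) (by omega)]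
      simp [pvStrided]
  | cons x t ih =>
    intro s ft hs hlen
    rw [PySem.List.enumerate_cons]
    simp only [List.foldl_cons]
    have hr0 : 0 ≤ PySem.Int.mod s n := PySem.Int.mod_nonneg s hn
    have hrn : PySem.Int.mod s n < n := PySem.Int.mod_lt s hn
    have hrlen : (PySem.Int.mod s n).toNat < ft.length := by omega
    have hget : PySem.List.pyGetD ft (PySem.Int.mod s n) [] = ft[(PySem.Int.mod s n).toNat] :=
      PySem.List.pyGetD_eq_getElem ft [] hr0 (by rw [hlen]; omega)
    have hset : PySem.List.pySetD ft (PySem.Int.mod s n) (PySem.List.pyGetD ft (PySem.Int.mod s n) [] ++ [x])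
        = ft.set (PySem.Int.mod s n).toNat (ft[(PySem.Int.mod s n).toNat] ++ [x]) := by
      rw [hget, PySem.List.pySetD_of_nonneg ft _ hr0]
    rw [hset, ih (s + 1) _ (by omega) (by simpa using hlen)]
    apply List.map_congr_left
    intro k hk
    have hkm : k < n.toNat := List.mem_range.mp hk
    by_cases hcase : PySem.Int.mod s n = (k : Int)
    · have hkr : (PySem.Int.mod s n).toNat = k := by omega
      rw [List.getD_eq_getElem _ [] (n := k) (by simp; omega)]
      simp only [hkr]
      rw [List.getElem_set_self, List.getD_eq_getElem ft [] (n := k) (by omega)]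
      simp only [pvStrided, if_pos hcase]
      simp
    · have hkr : (PySem.Int.mod s n).toNat ≠ k := by omega
      rw [List.getD_eq_getElem _ [] (n := k) (by simp; omega), List.getElem_set_ne (by omega),
          List.getD_eq_getElem ft [] (n := k) (by omega)]
      simp only [pvStrided, if_neg hcase]

lemma pvEveryN_filterMap {α : Type} (n : Nat) (hn : 0 < n) : ∀ (ys : List α),
    List.filterMap (fun k => ys[n * k]?) (List.range ((ys.length + n - 1) / n)) = pvEveryN ys n := by
  suffices H : ∀ (L : Nat) (ys : List α), ys.length ≤ L →
      List.filterMap (fun k => ys[n * k]?) (List.range ((ys.length + n - 1) / n)) = pvEveryN ys n by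
    intro ys; exact H ys.length ys le_rfl
  intro L
  induction L with
  | zero =>
    intro ys hy
    have : ys = [] := List.eq_nil_of_length_eq_zero (by omega)
    subst this
    simp only [List.length_nil, Nat.zero_add]
    rw [Nat.div_eq_of_lt (by omega)]
    simp [pvEveryN]
  | succ L ih =>
    intro ys hy
    match ys with
    | [] =>
      simp only [List.length_nil, Nat.zero_add]
      rw [Nat.div_eq_of_lt (by omega)]
      simp [pvEveryN]
    | x :: t =>
      have hc : ((x :: t).length + n - 1) / n = t.length / n + 1 := by
        simp only [List.length_cons]
        have h1 : t.length + 1 + n - 1 = t.length + n := by omega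
        rw [h1, Nat.add_div_right _ hn]
      have hdrop : (x :: t).drop n = t.drop (n - 1) := by
        cases n with
        | zero => omega
        | succ m => simp
      have hfun : (fun k => (x :: t)[n * (k + 1)]?) = (fun k => (t.drop (n - 1))[n * k]?) := by
        funext k
        rw [← hdrop, List.getElem?_drop]
        congr 1
        ring
      have hcount : ((t.drop (n - 1)).length + n - 1) / n = t.length / n := by
        rw [List.length_drop]
        rcases Nat.le_total (n - 1) t.length with h | h
        · congr 1; omega
        · rcases Nat.eq_or_lt_of_le h with h' | h'
          · congr 1; omega
          · rw [Nat.div_eq_of_lt (by omega), Nat.div_eq_of_lt (by omega)]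
      rw [hc, List.range_succ_eq_map, List.filterMap_cons, List.filterMap_map]
      simp only [Nat.mul_zero, List.getElem?_cons_zero]
      have hcomp : ((fun k => (x :: t)[n * k]?) ∘ Nat.succ) = (fun k => (t.drop (n - 1))[n * k]?) := by
        funext k
        have := congrFun hfun k
        simpa [Function.comp] using this
      rw [hcomp, ← hcount, ih (t.drop (n - 1)) (by rw [List.length_drop]; simp at hy; omega)]
      conv_rhs => rw [pvEveryN]

lemma pvSlice_eq_everyN {α : Type} (xs : List α) (f n : Int) (hf : 0 ≤ f) (hn : 0 < n) :
    PySem.List.slice? xs (some f) none n = some (pvEveryN (xs.drop f.toNat) n.toNat) := by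
  have hn' : 0 < n.toNat := by omega
  simp only [PySem.List.slice?, PySem.List.sliceIndices]
  rw [if_neg (by omega : ¬ n = 0)]
  simp only [if_neg (by omega : ¬ n < 0), if_neg (not_lt.mpr hf)]
  rw [if_pos hn]
  rcases Int.lt_or_le f (xs.length : Int) with hlt | hge
  case inr =>
    rw [min_eq_right hge, if_neg (lt_irrefl _)]
    have hdrop : xs.drop f.toNat = [] := List.drop_eq_nil_of_le (by omega)
    rw [hdrop]
    simp [pvEveryN]
  case inl =>
    rw [min_eq_left (le_of_lt hlt), if_pos hlt]
    have hD : (xs.drop f.toNat).length = xs.length - f.toNat := List.length_drop ..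
    have hcount : ((xs.length : Int) - f + n - 1) / n = (((xs.drop f.toNat).length + n.toNat - 1 : Nat) : Int) / ((n.toNat : Nat) : Int) := by
      rw [hD]
      congr 1
      · omega
      · omega
    have hcount2 : (((xs.length : Int) - f + n - 1) / n).toNat = ((xs.drop f.toNat).length + n.toNat - 1) / n.toNat := by
      rw [hcount, ← Int.natCast_div, Int.toNat_natCast]
    rw [hcount2]
    have hbody : (fun x : Nat => xs[(f + n * (x : Int)).toNat]?) = (fun k : Nat => (xs.drop f.toNat)[n.toNat * k]?) := by
      funext k
      rw [List.getElem?_drop]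
      congr 1
      have hnn : n = (n.toNat : Int) := (Int.toNat_of_nonneg (by omega)).symm
      have h1 : n * (k : Int) = ((n.toNat * k : Nat) : Int) := by
        conv_lhs => rw [hnn]
        push_cast
        ring
      rw [h1, ← Int.toNat_natCast (n.toNat * k)]
      omega
    rw [hbody, pvEveryN_filterMap n.toNat hn' (xs.drop f.toNat)]

lemma pvStrided_eq_everyN {α : Type} (n f : Int) (hn : 1 < n) (hf0 : 0 ≤ f) (hfn : f < n) :
    ∀ (xs : List α), pvStrided xs 0 n f = pvEveryN (xs.drop f.toNat) n.toNat := by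
  suffices H : ∀ (xs : List α) (s : Int), 0 ≤ s →
      pvStrided xs s n f = pvEveryN (xs.drop ((f - s)% n).toNat) n.toNat by
    intro xs
    have h := H xs 0 le_rfl
    rwa [Int.sub_zero, Int.emod_eq_of_lt hf0 hfn] at h
  intro xs
  induction xs with
  | nil => intro s _; simp [pvStrided, pvEveryN]
  | cons x t ih =>
    intro s hs
    have hmod : PySem.Int.mod s n = s% n := PySem.Int.mod_eq_emod_of_pos (by omega)
    have hr0 : 0 ≤ s% n := Int.emod_nonneg s (by omega)
    have hrn : s% n < n := Int.emod_lt_of_pos s (by omega)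
    have he : (f - s)% n = (f - s% n)% n := by
      conv_lhs => rw [Int.sub_emod]
      rw [Int.emod_eq_of_lt hf0 hfn]
    have he0 : 0 ≤ (f - s)% n := Int.emod_nonneg _ (by omega)
    have hen : (f - s)% n < n := Int.emod_lt_of_pos _ (by omega)
    have hiff : (f - s)% n = 0 ↔ s% n = f := by
      constructor
      · intro h0
        by_contra hne
        rcases Int.lt_or_lt_of_ne (fun hh => hne hh.symm) with hlt | hlt
        · -- f < s% n : f - s% n ∈ (-n, 0)
          have e1 : (f - s% n)% n = (f - s% n + n)% n := by
            conv_lhs => rw [show f - s% n = (f - s% n + n) + n * (-1) by ring]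
            exact Int.add_mul_emod_self_left _ _ _
          have e2 : (f - s% n + n)% n = f - s% n + n :=
            Int.emod_eq_of_lt (by omega) (by omega)
          have : (f - s% n)% n = f - s% n + n := e1.trans e2
          omega
        · have : (f - s% n)% n = f - s% n :=
            Int.emod_eq_of_lt (by omega) (by omega)
          omega
      · intro h
        rw [he, h, sub_self, Int.zero_emod]
    have hstep : (f - (s + 1))% n
        = (if (f - s)% n = 0 then n - 1 else (f - s)% n - 1) := by
      have h1 : (f - (s + 1))% n = ((f - s)% n - 1)% n := by
        rw [show f - (s + 1) = (f - s) - 1 by ring, Int.sub_emod (f - s) 1 n,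
            Int.emod_eq_of_lt (show (0:Int) ≤ 1 by omega) (show (1:Int) < n by omega)]
      split_ifs with h0
      · have e1 : ((0 : Int) - 1) % n = (n - 1) % n := by
          conv_lhs => rw [show (0 : Int) - 1 = (n - 1) + n * (-1) by ring]
          exact Int.add_mul_emod_self_left _ _ _
        have e2 : (n - 1) % n = n - 1 := Int.emod_eq_of_lt (by omega) (by omega)
        rw [h1, h0]
        exact e1.trans e2
      · rw [h1, Int.emod_eq_of_lt (by omega) (by omega)]
    by_cases hc : PySem.Int.mod s n = f
    · have h0 : (f - s)% n = 0 := hiff.mpr (by rw [← hmod]; exact hc)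
      simp only [pvStrided, if_pos hc]
      rw [h0]
      simp only [Int.toNat_zero, List.drop_zero]
      rw [ih (s + 1) (by omega), hstep, if_pos h0,
          show (n - 1).toNat = n.toNat - 1 by omega]
      conv_rhs => rw [pvEveryN]
    · have h0 : (f - s)% n ≠ 0 := fun hh => hc (by rw [hmod]; exact hiff.mp hh)
      simp only [pvStrided, if_neg hc]
      rw [ih (s + 1) (by omega), hstep, if_neg h0]
      congr 1
      rw [show ((f - s)% n).toNat = ((f - s)% n - 1).toNat + 1 by omega]
      rw [List.drop_succ_cons]

-- ===== VERDICT (by name: the statement is the Claim_ definition above) =====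
theorem stratified_round_robin_fold_test_indices_spec : Claim_equal_stratified_round_robin_fold_test_indices := by
  intro row_ids y n _ hpre
  obtain ⟨h2, -⟩ := hpre
  have hn : (0 : Int) < n := by omega
  have hlt : ¬ n < 2 := by omega
  unfold Spec_stratified_round_robin_fold_test_indices stratified_round_robin_fold_test_indices
    stratified_round_robin_fold_test_indices_alt
  simp only [if_neg hlt]
  set pos := PySem.List.sorted (((PySem.List.enumerate y).filter (fun p => p.2 == 1)).map (fun p => p.1))
    (fun i => PySem.List.pyGetD row_ids i "") false with hpos
  set neg := PySem.List.sorted (((PySem.List.enumerate y).filter (fun p => p.2 == 0)).map (fun p => p.1))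
    (fun i => PySem.List.pyGetD row_ids i "") false with hneg
  have hinitlen : ((PySem.List.pyRange 0 n 1).map (fun _ => ([] : List Int))).length = n.toNat := by
    simp [PySem.List.length_pyRange_one]
  rw [pvFoldA hn pos 0 _ le_rfl hinitlen]
  have hlen1 : ((List.range n.toNat).map
      (fun k => ((PySem.List.pyRange 0 n 1).map (fun _ => ([] : List Int))).getD k [] ++ pvStrided pos 0 n (k : Int))).length = n.toNat := by
    simp
  rw [pvFoldA hn neg 0 _ le_rfl hlen1]
  have e1 : ∀ k : Nat, ((PySem.List.pyRange 0 n 1).map (fun _ => ([] : List Int))).getD k [] = [] := by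
    intro k
    rcases Nat.lt_or_ge k ((PySem.List.pyRange 0 n 1).map (fun _ => ([] : List Int))).length with h | h
    · rw [List.getD_eq_getElem _ _ h]; simp
    · rw [List.getD_eq_default _ _ h]
  trans ((List.range n.toNat).map (fun k : Nat => pvStrided pos 0 n (k : Int) ++ pvStrided neg 0 n (k : Int)))
  · apply List.map_congr_left
    intro k hk
    have hkm : k < n.toNat := List.mem_range.mp hk
    have e2 : ((List.range n.toNat).map
        (fun k => ((PySem.List.pyRange 0 n 1).map (fun _ => ([] : List Int))).getD k [] ++ pvStrided pos 0 n (k : Int))).getD k []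
        = pvStrided pos 0 n (k : Int) := by
      rw [List.getD_eq_getElem]
      · simp only [List.getElem_map, List.getElem_range, e1, List.nil_append]
      · simpa using hkm
    rw [e2]
  · rw [PySem.List.pyRange_one 0 n, List.map_map]
    simp only [Int.sub_zero]
    apply List.map_congr_left
    intro k hk
    have hkm : k < n.toNat := by simpa using List.mem_range.mp hk
    have hki : (k : Int) < n := by omega
    simp only [Function.comp, Int.zero_add]
    rw [pvSlice_eq_everyN pos (k : Int) n (by positivity) hn,
        pvSlice_eq_everyN neg (k : Int) n (by positivity) hn,
        pvStrided_eq_everyN n (k : Int) (by omega) (by positivity) hki pos,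
        pvStrided_eq_everyN n (k : Int) (by omega) (by positivity) hki neg]
    simp
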